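-- pv_equiv track=rewrite | github.com/Malina03/Authorship-Attribution | src/feature_extraction.py | compute_freq_of_ranks
-- ===== SOURCE A (Python) =====
-- def compute_freq_of_ranks(freq_dict, word_ranks):
--     '''
--     Make a dictionary where keys represent ranks and the values are the frequency of the ranks.
--     '''
--     freq_of_ranks = {}
--     for word in freq_dict.keys():
--         rank = word_ranks[word]
--         if rank in freq_of_ranks.keys():
--             freq_of_ranks[rank] += freq_dict[word]
--         else:
--             freq_of_ranks[rank] = freq_dict[word]
--
--     return freq_of_ranks
-- ===== SOURCE B (Python) =====
-- def compute_freq_of_ranks(freq_dict, word_ranks):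
--     '''
--     Make a dictionary where keys represent ranks and the values are the frequency of the ranks.
--     '''
--     pairs = [(word_ranks[w], f) for w, f in freq_dict.items()]
--     return {r: sum(f for rr, f in pairs if rr == r)
--             for r in dict.fromkeys(r for r, _ in pairs)}
-- ===== Notes on version B (the rewrite author's own statement) =====
-- stated objective: alternative
-- what changed: Replaces A's single-pass incremental dict accumulation with a map-then-group decomposition: first build the list of (rank, freq) pairs, then emit one entry per distinct rank (first-appearance order) with the sum of its frequencies.
import Mathlib
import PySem

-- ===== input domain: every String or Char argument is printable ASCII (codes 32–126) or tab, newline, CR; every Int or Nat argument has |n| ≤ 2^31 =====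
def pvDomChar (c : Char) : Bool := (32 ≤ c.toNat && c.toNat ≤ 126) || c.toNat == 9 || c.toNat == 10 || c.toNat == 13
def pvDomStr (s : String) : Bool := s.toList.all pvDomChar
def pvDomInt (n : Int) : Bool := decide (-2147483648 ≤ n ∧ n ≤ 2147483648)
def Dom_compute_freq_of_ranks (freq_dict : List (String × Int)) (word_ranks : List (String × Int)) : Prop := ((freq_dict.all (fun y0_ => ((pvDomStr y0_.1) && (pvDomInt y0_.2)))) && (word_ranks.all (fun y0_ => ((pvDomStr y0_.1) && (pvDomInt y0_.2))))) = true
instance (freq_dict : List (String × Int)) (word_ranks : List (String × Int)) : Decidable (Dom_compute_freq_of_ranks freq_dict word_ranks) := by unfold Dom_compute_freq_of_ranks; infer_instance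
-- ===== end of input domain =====

-- B replaces A's incremental accumulation by a map-then-group decomposition (objective: alternative, same observable behaviour).

-- ===== PORT A =====
-- the loop 'for word in freq_dict.keys(): rank = word_ranks[word]; …' — none = KeyError on word_ranks[word]
def pvALoop (fd : PySem.Dict String Int) (wr : PySem.Dict String Int) :
    List String → PySem.Dict Int Int → Option (PySem.Dict Int Int)
  | [], d => some d
  | w :: ws, d =>
    match wr.get? w with
    | none => none
    | some rank =>
      pvALoop fd wr ws
        (if d.contains rank then d.insert rank (d.getD rank 0 + fd.getD w 0)
         else d.insert rank (fd.getD w 0))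

def compute_freq_of_ranks (freq_dict : List (String × Int)) (word_ranks : List (String × Int)) : List (Int × Int) :=
  let fd := PySem.Dict.ofList freq_dict
  let wr := PySem.Dict.ofList word_ranks
  match pvALoop fd wr fd.keys PySem.Dict.empty with
  | some d => d.items
  | none => []   -- KeyError path, excluded by Pre_

-- ===== PORT B =====
-- pairs = [(word_ranks[w], f) for w, f in freq_dict.items()] — none = KeyError on word_ranks[w]
def pvBPairs (wr : PySem.Dict String Int) : List (String × Int) → Option (List (Int × Int))
  | [] => some []
  | p :: ps =>
    match wr.get? p.1 with
    | none => none
    | some r =>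
      match pvBPairs wr ps with
      | none => none
      | some rest => some ((r, p.2) :: rest)

def compute_freq_of_ranks_alt (freq_dict : List (String × Int)) (word_ranks : List (String × Int)) : List (Int × Int) :=
  let fd := PySem.Dict.ofList freq_dict
  let wr := PySem.Dict.ofList word_ranks
  match pvBPairs wr fd.items with
  | none => []   -- KeyError path, excluded by Pre_
  | some pairs =>
    (PySem.List.dedup (pairs.map (·.1))).map
      (fun r => (r, ((pairs.filter (fun p => p.1 == r)).map (·.2)).sum))

-- ===== PRECONDITION & SPEC =====
-- Pre_ excludes exactly the inputs where A raises KeyError: a word of freq_dict missing from word_ranks.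
def Pre_compute_freq_of_ranks (freq_dict : List (String × Int)) (word_ranks : List (String × Int)) : Prop :=
  (freq_dict.all (fun p => word_ranks.any (fun q => q.1 == p.1))) = true
instance (freq_dict : List (String × Int)) (word_ranks : List (String × Int)) : Decidable (Pre_compute_freq_of_ranks freq_dict word_ranks) := by unfold Pre_compute_freq_of_ranks; infer_instance

def pvWitness_compute_freq_of_ranks : (List (String × Int)) × (List (String × Int)) :=
  ([("a", 2), ("b", 3), ("c", 1)], [("a", 1), ("b", 2), ("c", 1)])

def Spec_compute_freq_of_ranks (freq_dict : List (String × Int)) (word_ranks : List (String × Int)) (out : List (Int × Int)) : Prop := out = compute_freq_of_ranks_alt freq_dict word_ranks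
instance (freq_dict : List (String × Int)) (word_ranks : List (String × Int)) (out : List (Int × Int)) : Decidable (Spec_compute_freq_of_ranks freq_dict word_ranks out) := by unfold Spec_compute_freq_of_ranks; infer_instance

-- ===== CLAIM (what is proved, stated in full; the proofs are below) =====
def Claim_equal_compute_freq_of_ranks : Prop := ∀ (freq_dict : List (String × Int)) (word_ranks : List (String × Int)), Dom_compute_freq_of_ranks freq_dict word_ranks → Pre_compute_freq_of_ranks freq_dict word_ranks → Spec_compute_freq_of_ranks freq_dict word_ranks (compute_freq_of_ranks freq_dict word_ranks)

-- ===== LEMMAS AND PROOFS =====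

-- keys of ofList are the first occurrences of the list's first components
theorem pv_mem_keys_ofList {l : List (String × Int)} {k : String} :
    k ∈ (PySem.Dict.ofList l).keys ↔ k ∈ l.map Prod.fst := by
  have h := PySem.Dict.keys_foldl_insert_key (κ := String) (ν := Int)
    l (fun p => p.1) (fun _ p => p.2) PySem.Dict.empty
  simp only [PySem.Dict.keys_empty] at h
  show k ∈ (PySem.Dict.empty.update l).keys ↔ _
  unfold PySem.Dict.update
  rw [h]
  rw [show PySem.Set.update ([] : List String) (l.map (fun p => p.1)) =
        PySem.Set.ofList (l.map (fun p => p.1)) from rfl]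
  rw [PySem.Set.mem_ofList]

theorem pv_get?_eq_getD_of_contains (d : PySem.Dict String Int) (k : String)
    (h : d.contains k = true) : d.get? k = some (d.getD k 0) := by
  have hs : (d.get? k).isSome = true := by
    rw [← PySem.Dict.contains_eq_isSome_get?]; exact h
  obtain ⟨v, hv⟩ := Option.isSome_iff_exists.mp hs
  rw [hv, PySem.Dict.getD_of_get?_eq_some _ _ hv]

-- A's if-branch IS Python's d[rank] = f(d.get(rank, 0))
theorem pv_step_eq_modify (d : PySem.Dict Int Int) (r f : Int) :
    (if d.contains r then d.insert r (d.getD r 0 + f) else d.insert r f) =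
      d.modify r 0 (· + f) := by
  by_cases h : d.contains r = true
  · simp [h, PySem.Dict.modify]
  · have h' : d.contains r = false := by simpa using h
    simp [h', PySem.Dict.modify, PySem.Dict.getD_of_not_contains _ _ h']

-- A's loop succeeds and is the modify-fold when every word is ranked
theorem pv_aLoop_eq (fd wr : PySem.Dict String Int) :
    ∀ (ws : List String) (d : PySem.Dict Int Int),
      (∀ w ∈ ws, wr.contains w = true) →
      pvALoop fd wr ws d =
        some (ws.foldl (fun d w => d.modify (wr.getD w 0) 0 (· + fd.getD w 0)) d)
  | [], d, _ => rfl
  | w :: ws, d, h => by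
    have hw : wr.contains w = true := h w (List.mem_cons_self)
    rw [pvALoop, pv_get?_eq_getD_of_contains wr w hw]
    simp only [List.foldl_cons]
    rw [pv_step_eq_modify]
    exact pv_aLoop_eq fd wr ws _ (fun x hx => h x (List.mem_cons_of_mem _ hx))

-- B's pair-building succeeds under the same condition
theorem pv_bPairs_eq (wr : PySem.Dict String Int) :
    ∀ (l : List (String × Int)),
      (∀ p ∈ l, wr.contains p.1 = true) →
      pvBPairs wr l = some (l.map (fun p => (wr.getD p.1 0, p.2)))
  | [], _ => rfl
  | p :: ps, h => by
    have hp : wr.contains p.1 = true := h p (List.mem_cons_self)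
    rw [pvBPairs, pv_get?_eq_getD_of_contains wr p.1 hp,
      pv_bPairs_eq wr ps (fun q hq => h q (List.mem_cons_of_mem _ hq))]
    simp

-- getD of the modify-fold: initial value plus the sum of matching frequencies
theorem pv_getD_fold :
    ∀ (pairs : List (Int × Int)) (d : PySem.Dict Int Int) (r : Int),
      (pairs.foldl (fun d p => d.modify p.1 0 (· + p.2)) d).getD r 0 =
        d.getD r 0 + ((pairs.filter (fun p => p.1 == r)).map (·.2)).sum
  | [], d, r => by simp
  | p :: ps, d, r => by
    simp only [List.foldl_cons, List.filter_cons]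
    rw [pv_getD_fold ps _ r]
    by_cases hpr : p.1 = r
    · simp [hpr]
      ring
    · have : (p.1 == r) = false := by simpa using hpr
      simp [this, PySem.Dict.getD_modify, Ne.symm hpr]

-- the modify-fold's items are exactly B's grouped list
theorem pv_fold_items (pairs : List (Int × Int)) :
    ((pairs.foldl (fun d p => d.modify p.1 0 (· + p.2)) PySem.Dict.empty).items) =
      (PySem.List.dedup (pairs.map (·.1))).map
        (fun r => (r, ((pairs.filter (fun p => p.1 == r)).map (·.2)).sum)) := by
  have hkeys :
      (pairs.foldl (fun d p => d.modify p.1 0 (· + p.2)) PySem.Dict.empty).keys =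
        PySem.List.dedup (pairs.map (·.1)) := by
    have h := PySem.Dict.keys_foldl_modify_key (κ := Int) (ν := Int)
      pairs (fun p => p.1) 0 (fun _ p => (· + p.2)) PySem.Dict.empty
    rw [h, PySem.Dict.keys_empty, PySem.List.dedup_eq_ofList]
    rfl
  have hnd :
      (pairs.foldl (fun d p => d.modify p.1 0 (· + p.2)) PySem.Dict.empty).keys.Nodup := by
    exact PySem.Dict.nodup_keys_foldl_modify_key pairs (fun p => p.1) 0
      (fun _ p => (· + p.2)) PySem.Dict.empty (by simp [PySem.Dict.keys_empty])
  rw [PySem.Dict.items_eq_map_keys _ hnd 0, hkeys]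
  apply List.map_congr_left
  intro r _
  rw [pv_getD_fold]
  simp [PySem.Dict.getD_empty]

-- ===== VERDICT (by name: the statement is the Claim_ definition above) =====
theorem compute_freq_of_ranks_spec : Claim_equal_compute_freq_of_ranks := by
  intro freq_dict word_ranks _hdom hpre
  unfold Spec_compute_freq_of_ranks compute_freq_of_ranks compute_freq_of_ranks_alt
  dsimp only
  set fd := PySem.Dict.ofList freq_dict with hfd
  set wr := PySem.Dict.ofList word_ranks with hwr
  -- every word of freq_dict is ranked
  have hcont : ∀ w ∈ fd.keys, wr.contains w = true := by
    intro w hwk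
    have hwmem : w ∈ freq_dict.map Prod.fst := pv_mem_keys_ofList.mp hwk
    obtain ⟨p, hp, hpw⟩ := List.mem_map.mp hwmem
    have := List.all_eq_true.mp hpre p hp
    obtain ⟨q, hq, hq1⟩ := List.any_eq_true.mp this
    have hq1' : q.1 = w := by rw [← hpw]; exact eq_of_beq hq1
    rw [PySem.Dict.contains_iff_mem_keys]
    exact pv_mem_keys_ofList.mpr (List.mem_map.mpr ⟨q, hq, hq1'⟩)
  have hndfd : fd.keys.Nodup := PySem.Dict.nodup_keys_ofList freq_dict
  -- A's side
  rw [pv_aLoop_eq fd wr fd.keys PySem.Dict.empty hcont]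
  -- B's side
  have hitems : fd.items = fd.keys.map (fun k => (k, fd.getD k 0)) :=
    PySem.Dict.items_eq_map_keys fd hndfd 0
  have hcont' : ∀ p ∈ fd.items, wr.contains p.1 = true := by
    intro p hp
    exact hcont p.1 (PySem.Dict.mem_keys_of_mem_items fd hp)
  rw [pv_bPairs_eq wr fd.items hcont']
  -- both reduce to the grouped list of the same (rank, freq) pairs
  have hpairs : fd.items.map (fun p => (wr.getD p.1 0, p.2)) =
      fd.keys.map (fun w => (wr.getD w 0, fd.getD w 0)) := by
    rw [hitems, List.map_map]; rfl
  have hfold : fd.keys.foldl (fun d w => d.modify (wr.getD w 0) 0 (· + fd.getD w 0))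
        PySem.Dict.empty =
      (fd.keys.map (fun w => (wr.getD w 0, fd.getD w 0))).foldl
        (fun d p => d.modify p.1 0 (· + p.2)) PySem.Dict.empty := by
    rw [List.foldl_map]
  rw [hfold]
  dsimp only
  rw [pv_fold_items, hpairs]
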